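-- pv_equiv track=rewrite | github.com/ArTitoff/BSUIR | sem4/аоис/4_aois.py | can_combine
-- ===== SOURCE A (Python) =====
-- def can_combine(b1, b2):
--     """Проверяет возможность склеивания двух термов"""
--     diff = 0
--     combined = []
--     for c1, c2 in zip(b1, b2):
--         if c1 == c2:
--             combined.append(c1)
--         elif c1 == '-' or c2 == '-':
--             return None
--         else:
--             diff += 1
--             combined.append('-')
--     return ''.join(combined) if diff == 1 else None
-- ===== SOURCE B (Python) =====
-- def can_combine(b1, b2):
--     """Multi-pass: validate, count diffs, then build, over the zipped pairs."""
--     pairs = list(zip(b1, b2))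
--     if any(c1 != c2 and (c1 == '-' or c2 == '-') for c1, c2 in pairs):
--         return None
--     diff = sum(1 for c1, c2 in pairs if c1 != c2)
--     if diff != 1:
--         return None
--     return ''.join(c1 if c1 == c2 else '-' for c1, c2 in pairs)
-- ===== Notes on version B (the rewrite author's own statement) =====
-- stated objective: simpler
-- what changed: A's single early-exit loop with a running counter and accumulator is split into three independent passes over the zipped pairs: a validity scan, a count of differing positions, and a comprehension building the merged term.
import Mathlib
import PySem

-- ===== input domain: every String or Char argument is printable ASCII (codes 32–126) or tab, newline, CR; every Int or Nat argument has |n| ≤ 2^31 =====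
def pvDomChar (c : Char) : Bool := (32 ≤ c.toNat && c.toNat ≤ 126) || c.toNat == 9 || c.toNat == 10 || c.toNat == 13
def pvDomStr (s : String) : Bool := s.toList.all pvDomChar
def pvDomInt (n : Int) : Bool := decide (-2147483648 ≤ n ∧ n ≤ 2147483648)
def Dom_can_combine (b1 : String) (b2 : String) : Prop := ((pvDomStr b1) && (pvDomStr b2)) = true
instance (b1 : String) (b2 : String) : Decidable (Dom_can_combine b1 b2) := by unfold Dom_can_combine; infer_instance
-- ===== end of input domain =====

-- B replaces A's single early-exit loop by three independent passes over the zipped pairs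
-- (validity scan, diff count, build): simpler decomposition, same O(n) cost.


-- ===== PORT A =====
-- Loop of A: early-exit pass over the zipped chars, carrying diff counter and accumulator.
def canCombineLoop : List (Char × Char) → Int → List Char → Option String
  | [], diff, combined => if diff = 1 then some (String.mk combined) else none
  | (c1, c2) :: rest, diff, combined =>
    if c1 = c2 then canCombineLoop rest diff (combined ++ [c1])
    else if c1 = '-' ∨ c2 = '-' then none
    else canCombineLoop rest (diff + 1) (combined ++ ['-'])

def can_combine (b1 : String) (b2 : String) : Option String :=
  canCombineLoop (b1.toList.zip b2.toList) 0 []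

-- ===== PORT B =====
def can_combine_alt (b1 : String) (b2 : String) : Option String :=
  let pairs := b1.toList.zip b2.toList
  if pairs.any (fun p => p.1 != p.2 && (p.1 == '-' || p.2 == '-')) then none
  else if pairs.countP (fun p => p.1 != p.2) ≠ 1 then none
  else some (String.mk (pairs.map (fun p => if p.1 = p.2 then p.1 else '-')))

-- ===== PRECONDITION & SPEC =====
def Spec_can_combine (b1 : String) (b2 : String) (out : Option String) : Prop := out = can_combine_alt b1 b2
instance (b1 : String) (b2 : String) (out : Option String) : Decidable (Spec_can_combine b1 b2 out) := by unfold Spec_can_combine; infer_instance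

-- ===== CLAIM (what is proved, stated in full; the proofs are below) =====
def Claim_equal_can_combine : Prop := ∀ (b1 : String) (b2 : String), Dom_can_combine b1 b2 → Spec_can_combine b1 b2 (can_combine b1 b2)

-- ===== LEMMAS AND PROOFS =====

-- ===== VERDICT (by name: the statement is the Claim_ definition above) =====
-- A's loop, characterised by B's three passes (generalising the carried state).
theorem canCombineLoop_eq (ps : List (Char × Char)) : ∀ (diff : Int) (acc : List Char),
    canCombineLoop ps diff acc =
      if ps.any (fun p => p.1 != p.2 && (p.1 == '-' || p.2 == '-')) then none
      else if diff + (ps.countP (fun p => p.1 != p.2) : Int) ≠ 1 then none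
      else some (String.mk (acc ++ ps.map (fun p => if p.1 = p.2 then p.1 else '-'))) := by
  induction ps with
  | nil => intro diff acc; simp [canCombineLoop]
  | cons p rest ih =>
    intro diff acc
    obtain ⟨c1, c2⟩ := p
    by_cases h : c1 = c2
    · simp [canCombineLoop, h, ih]
    · by_cases hd : c1 = '-' ∨ c2 = '-'
      · simp [canCombineLoop, h, hd]
      · have hne : (c1 != c2) = true := by simp [h]
        simp only [canCombineLoop, if_neg h, if_neg hd, ih, List.any_cons,
          List.countP_cons, List.map_cons, hne]
        simp only [Bool.true_and]
        by_cases hb : (c1 == '-' || c2 == '-') = true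
        · exact absurd (by simpa using hb) hd
        · simp only [hb, Bool.false_or]
          by_cases hrest : rest.any (fun p => p.1 != p.2 && (p.1 == '-' || p.2 == '-')) = true
          · simp [hrest]
          · simp only [Bool.not_eq_true] at hrest
            simp only [hrest]
            have : diff + 1 + (rest.countP (fun p => p.1 != p.2) : Int) =
                diff + ((rest.countP (fun p => p.1 != p.2) : Int) + 1) := by ring
            simp [this, List.append_assoc]

theorem can_combine_spec : Claim_equal_can_combine := by
  intro b1 b2 _
  unfold Spec_can_combine can_combine can_combine_alt
  rw [canCombineLoop_eq]
  simp
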